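-- pv_equiv track=rewrite | github.com/Niolan/TASK_2 | anagrams/anagrams.py | palindrom
-- ===== SOURCE A (Python) =====
-- def palindrom(text):
--     s = [i[::-1] for i in text.split()]
--     s = list(' '.join(s))
--     s = [i for i in s if i.isalpha()]
--     text = list(text)
--     for i in range(len(text)):
--         if not text[i].isalpha():
--             s.insert(i, text[i])
--     return ''.join(s)
-- ===== SOURCE B (Python) =====
-- def palindrom(text):
--     letters = []
--     for tok in text.split():
--         for c in reversed(tok):
--             if c.isalpha():
--                 letters.append(c)
--     out = []
--     k = 0
--     for c in text:
--         if c.isalpha():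
--             out.append(letters[k])
--             k += 1
--         else:
--             out.append(c)
--     return ''.join(out)
-- ===== Notes on version B (the rewrite author's own statement) =====
-- stated objective: alternative
-- what changed: A builds the reversed-letter stream and then re-inserts every non-alpha character with list.insert inside an index loop; B makes one forward pass over the text, streaming the reversed-word letters into the alpha positions with a running index and keeping non-alpha characters in place (no list.insert at all).
import Mathlib
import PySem

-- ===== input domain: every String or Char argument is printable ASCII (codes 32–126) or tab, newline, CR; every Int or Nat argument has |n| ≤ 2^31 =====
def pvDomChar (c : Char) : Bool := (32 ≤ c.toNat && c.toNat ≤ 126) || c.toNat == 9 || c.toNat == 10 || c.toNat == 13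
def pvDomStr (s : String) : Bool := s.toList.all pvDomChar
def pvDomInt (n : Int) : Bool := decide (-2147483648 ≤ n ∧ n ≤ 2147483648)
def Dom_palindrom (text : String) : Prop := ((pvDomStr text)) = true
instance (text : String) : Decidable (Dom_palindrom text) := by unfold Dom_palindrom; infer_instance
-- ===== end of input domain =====

-- B replaces A's list.insert loop by a single forward pass that streams the
-- reversed-word letters into the alpha positions (objective: alternative).

-- ===== PORT A =====
-- literal port of A: split, reverse each word via [::-1], join with ' ', keep
-- alpha chars, then for each index i insert the non-alpha text[i] at position i.
-- (text[i] is always in range inside the loop, so List.getD is exact there.)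
def palindrom (text : String) : String :=
  let s := (PySem.Chars.split₀ text.toList).map
      (fun w => (PySem.List.slice? w none none (-1)).getD [])
  let s := PySem.Chars.join [' '] s
  let s := s.filter (fun c => PySem.Chars.isalpha c)
  let tl := text.toList
  let s := (List.range tl.length).foldl
      (fun s i =>
        if ¬ (PySem.Chars.isalpha (tl.getD i ' ') = true) then
          PySem.List.insert s (i : Int) (tl.getD i ' ')
        else s) s
  String.ofList s

-- ===== PORT B =====
-- letters[k], k += 1 rendered structurally: consume the letter list head by head
-- (the index never runs past the end, so the headD default is never used).
def pvConsume : List Char → List Char → List Char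
  | [], _ => []
  | c :: cs, ls =>
      if PySem.Chars.isalpha c = true then ls.headD c :: pvConsume cs ls.tail
      else c :: pvConsume cs ls

def palindrom_alt (text : String) : String :=
  let tl := text.toList
  let letters := (PySem.Chars.split₀ tl).foldl
      (fun acc w => acc ++ (w.reverse.filter (fun c => PySem.Chars.isalpha c))) []
  String.ofList (pvConsume tl letters)

-- ===== PRECONDITION & SPEC =====
def Spec_palindrom (text : String) (out : String) : Prop := out = palindrom_alt text
instance (text : String) (out : String) : Decidable (Spec_palindrom text out) := by unfold Spec_palindrom; infer_instance

-- ===== CLAIM (what is proved, stated in full; the proofs are below) =====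
def Claim_equal_palindrom : Prop := ∀ (text : String), Dom_palindrom text → Spec_palindrom text (palindrom text)

-- ===== LEMMAS AND PROOFS =====

-- alpha count of a character list
def pvCA (l : List Char) : Nat := (l.filter (fun c => PySem.Chars.isalpha c)).length

-- the step function of A's insert loop
def pvStep (tl : List Char) (s : List Char) (i : Nat) : List Char :=
  if ¬ (PySem.Chars.isalpha (tl.getD i ' ') = true) then
    PySem.List.insert s (i : Int) (tl.getD i ' ')
  else s

theorem pv_isspace_not_isalpha (c : Char) (h : PySem.Chars.isspace c = true) :
    PySem.Chars.isalpha c = false := by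
  revert h
  simp only [PySem.Chars.isspace, PySem.Chars.isalpha, PySem.Chars.isupper, PySem.Chars.islower,
    Char.le_def, UInt32.le_iff_toNat_le, Char.toNat, Bool.or_eq_true, Bool.and_eq_true,
    decide_eq_true_eq, Bool.or_eq_false_iff, Bool.and_eq_false_iff, decide_eq_false_iff_not, not_le]
  have hA : 'A'.val.toNat = 65 := rfl
  have hZ : 'Z'.val.toNat = 90 := rfl
  have ha : 'a'.val.toNat = 97 := rfl
  have hz : 'z'.val.toNat = 122 := rfl
  omega

-- the split₀ worker preserves the total alpha count
theorem pv_go_sum : ∀ (s cur : List Char) (acc : List (List Char)),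
    ((PySem.Chars.split₀.go s cur acc).map pvCA).sum
      = pvCA s + pvCA cur + (acc.map pvCA).sum := by
  intro s
  induction s with
  | nil =>
      intro cur acc
      rw [PySem.Chars.split₀.go]
      split_ifs with h
      · have : cur = [] := by simpa [List.isEmpty_iff] using h
        simp [this, pvCA]
      · simp [List.map_reverse, List.sum_reverse, pvCA]
        omega
  | cons c rest ih =>
      intro cur acc
      rw [PySem.Chars.split₀.go]
      have hca : pvCA (c :: rest)
          = (if PySem.Chars.isalpha c = true then 1 else 0) + pvCA rest := by
        simp only [pvCA, List.filter_cons]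
        split_ifs <;> simp <;> omega
      split_ifs with h1 h2
      · have hna := pv_isspace_not_isalpha c h1
        have : cur = [] := by simpa [List.isEmpty_iff] using h2
        rw [ih]
        simp only [hca, hna, this]
        simp [pvCA]
      · have hna := pv_isspace_not_isalpha c h1
        rw [ih]
        simp only [hca, hna]
        simp [pvCA]
        omega
      · rw [ih]
        simp only [hca]
        have : pvCA (c :: cur)
            = (if PySem.Chars.isalpha c = true then 1 else 0) + pvCA cur := by
          simp only [pvCA, List.filter_cons]
          split_ifs <;> simp <;> omega
        rw [this]
        omega

theorem pv_sum_split₀ (t : List Char) :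
    (((PySem.Chars.split₀ t).map pvCA)).sum = pvCA t := by
  have := pv_go_sum t [] []
  simpa [PySem.Chars.split₀, pvCA] using this

-- B's letter stream, in flatMap form
theorem pv_letters_eq (t : List Char) :
    (PySem.Chars.split₀ t).foldl
        (fun acc w => acc ++ (w.reverse.filter (fun c => PySem.Chars.isalpha c))) []
      = (PySem.Chars.split₀ t).flatMap
          (fun w => w.reverse.filter (fun c => PySem.Chars.isalpha c)) := by
  simpa using PySem.List.foldl_append_eq_flatMap
    (fun w => w.reverse.filter (fun c => PySem.Chars.isalpha c)) (PySem.Chars.split₀ t) []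

theorem pv_letters_len (t : List Char) :
    ((PySem.Chars.split₀ t).flatMap
        (fun w => w.reverse.filter (fun c => PySem.Chars.isalpha c))).length = pvCA t := by
  rw [List.length_flatMap]
  rw [← pv_sum_split₀ t]
  congr 1
  simp [pvCA, List.filter_reverse]

-- filtering the space-joined words keeps exactly the per-word alpha letters
theorem pv_filter_join : ∀ (ws : List (List Char)),
    (PySem.Chars.join [' '] ws).filter (fun c => PySem.Chars.isalpha c)
      = ws.flatMap (fun w => w.filter (fun c => PySem.Chars.isalpha c)) := by
  intro ws
  induction ws with
  | nil => simp [PySem.Chars.join_nil]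
  | cons w ws ih =>
      cases ws with
      | nil => simp [PySem.Chars.join_singleton]
      | cons w' ws' =>
          rw [PySem.Chars.join_cons_cons]
          simp only [List.filter_append, ih, List.flatMap_cons]
          have : ([' '] : List Char).filter (fun c => PySem.Chars.isalpha c) = [] := by decide
          simp [this]

-- A's stream equals B's stream
theorem pv_stream_eq (t : List Char) :
    (PySem.Chars.join [' ']
        ((PySem.Chars.split₀ t).map (fun w => (PySem.List.slice? w none none (-1)).getD []))).filter
        (fun c => PySem.Chars.isalpha c)
      = (PySem.Chars.split₀ t).flatMap
          (fun w => w.reverse.filter (fun c => PySem.Chars.isalpha c)) := by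
  have hrev : ∀ w : List Char, (PySem.List.slice? w none none (-1)).getD [] = w.reverse := by
    intro w; rw [PySem.List.slice?_none_none_neg_one]; rfl
  rw [pv_filter_join]
  simp [hrev, List.flatMap_map]

-- the core loop lemma: A's absolute-index insert loop is B's single consuming pass
theorem pv_loop_aux (tl : List Char) : ∀ (rest : List Char) (j : Nat) (out ls : List Char),
    rest = tl.drop j → out.length = j → pvCA rest = ls.length →
    (List.range' j rest.length).foldl (pvStep tl) (out ++ ls) = out ++ pvConsume rest ls := by
  intro rest
  induction rest with
  | nil =>
      intro j out ls _ _ hlen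
      have : ls = [] := by
        have : ls.length = 0 := by simpa [pvCA] using hlen.symm
        exact List.length_eq_zero_iff.mp this
      simp [this, pvConsume]
  | cons c rest' ih =>
      intro j out ls hdrop hout hlen
      have hget : tl.getD j ' ' = c := by
        have h0 : tl[j]? = some c := by
          have h1 : (List.drop j tl)[0]? = tl[j + 0]? := List.getElem?_drop
          rw [← hdrop] at h1
          simpa using h1.symm
        simp [List.getD_eq_getElem?_getD, h0]
      have hdrop' : rest' = tl.drop (j + 1) := by
        have : (tl.drop j).tail = tl.drop (j + 1) := by
          rw [← List.drop_drop]
          simp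
        rw [← this, ← hdrop]
        rfl
      have hrange : List.range' j (rest'.length + 1) = j :: List.range' (j + 1) rest'.length :=
        List.range'_succ
      simp only [List.length_cons, hrange, List.foldl_cons]
      by_cases hc : PySem.Chars.isalpha c = true
      · -- alpha: A leaves the state, B consumes one letter
        have hpos : 0 < ls.length := by
          rw [← hlen]
          simp only [pvCA, List.filter_cons, hc]
          simp
        obtain ⟨l, ls', rfl⟩ : ∃ l ls', ls = l :: ls' := by
          cases ls with
          | nil => simp at hpos
          | cons a b => exact ⟨a, b, rfl⟩
        have hstep : pvStep tl (out ++ l :: ls') j = out ++ l :: ls' := by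
          unfold pvStep
          rw [hget]
          simp [hc]
        have hlen' : pvCA rest' = ls'.length := by
          have hsplit : pvCA (c :: rest') = pvCA rest' + 1 := by
            simp only [pvCA, List.filter_cons, hc]; simp
          simp only [hsplit, List.length_cons] at hlen
          omega
        rw [hstep, show out ++ l :: ls' = (out ++ [l]) ++ ls' by simp,
          ih (j + 1) (out ++ [l]) ls' hdrop' (by simp [hout]) hlen']
        simp [pvConsume, hc]
      · -- non-alpha: A inserts at position j = |out|, B keeps the character
        have hc' : PySem.Chars.isalpha c = false := by simpa using hc
        have hstep : pvStep tl (out ++ ls) j = out ++ c :: ls := by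
          unfold pvStep
          rw [hget]
          simp only [hc', Bool.false_eq_true, not_false_iff, if_pos]
          rw [PySem.List.insert_natCast (out ++ ls) j c (by simp [← hout]),
            List.take_left' hout, List.drop_left' hout]
        have hlen' : pvCA rest' = ls.length := by
          simpa [pvCA, List.filter_cons, hc'] using hlen
        rw [hstep, show out ++ c :: ls = (out ++ [c]) ++ ls by simp,
          ih (j + 1) (out ++ [c]) ls hdrop' (by simp [hout]) hlen']
        simp [pvConsume, hc']

-- ===== VERDICT (by name: the statement is the Claim_ definition above) =====
theorem palindrom_spec : Claim_equal_palindrom := by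
  intro text _
  unfold Spec_palindrom palindrom palindrom_alt
  simp only []
  rw [pv_letters_eq, pv_stream_eq]
  congr 1
  rw [List.range_eq_range']
  have hmain := pv_loop_aux text.toList text.toList 0 []
      ((PySem.Chars.split₀ text.toList).flatMap
        (fun w => w.reverse.filter (fun c => PySem.Chars.isalpha c)))
      (by simp) rfl (pv_letters_len text.toList).symm
  have hfun : (fun (s : List Char) (i : Nat) =>
      if ¬ (PySem.Chars.isalpha (text.toList.getD i ' ') = true) then
        PySem.List.insert s (i : Int) (text.toList.getD i ' ')
      else s) = pvStep text.toList := rfl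
  rw [hfun]
  simpa only [List.nil_append] using hmain
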